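-- pv_equiv track=rewrite | github.com/luornor/A2SV | contest_11/C_Parity_Sort.py | solve
-- ===== SOURCE A (Python) =====
-- def solve(n,a):
--     odd = sorted(a[i] for i in range(n) if a[i] % 2)
--     even = sorted(a[i] for i in range(n) if a[i] % 2 == 0)
--     odd.sort()
--     even.sort()
--
--     sorted_array = []
--     even_idx = 0
--     odd_idx = 0
--
--     for num in a:
--         if num % 2 == 0:
--             sorted_array.append(even[even_idx])
--             even_idx += 1
--         else:
--             sorted_array.append(odd[odd_idx])
--             odd_idx += 1
--
--     if sorted_array == sorted(a):
--         return 'YES'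
--     else:
--         return 'NO'
-- ===== SOURCE B (Python) =====
-- def solve(n, a):
--     b = sorted(a[i] for i in range(n))
--     return 'YES' if all(a[i] % 2 == b[i] % 2 for i in range(len(a))) else 'NO'
-- ===== Notes on version B (the rewrite author's own statement) =====
-- stated objective: simpler
-- what changed: Instead of bucketing evens/odds, sorting each bucket and reconstructing the interleaved array, B reads the n elements once, sorts them once, and compares the per-position parity sequences of the original and the sorted list, which is equivalent.
import Mathlib
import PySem

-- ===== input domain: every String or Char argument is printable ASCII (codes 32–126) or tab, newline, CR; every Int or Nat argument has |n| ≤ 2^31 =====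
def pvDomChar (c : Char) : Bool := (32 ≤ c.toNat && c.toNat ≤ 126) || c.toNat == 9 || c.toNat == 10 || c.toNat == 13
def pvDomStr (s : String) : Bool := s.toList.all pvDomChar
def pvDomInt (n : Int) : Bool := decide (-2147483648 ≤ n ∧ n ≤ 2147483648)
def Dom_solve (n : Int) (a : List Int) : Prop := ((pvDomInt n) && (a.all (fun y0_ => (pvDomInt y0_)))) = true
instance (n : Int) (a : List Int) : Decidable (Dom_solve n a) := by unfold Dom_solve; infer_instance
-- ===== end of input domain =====

-- B is simpler: sort once and compare per-position parities, instead of A's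
-- bucket-sort-and-reconstruct.  Equivalence is over the return value only.

-- ===== PORT A =====
def solve (n : Int) (a : List Int) : String :=
  -- a[i] for i in range(n): Python raises IndexError out of range; inside Pre_ all indices are in range
  let gathered := (PySem.List.pyRange 0 n 1).filterMap (fun i => PySem.List.pyGet? a i)
  let odd := PySem.List.sorted (gathered.filter (fun x => !(PySem.Int.mod x 2 == 0))) (fun x => x) false
  let even := PySem.List.sorted (gathered.filter (fun x => PySem.Int.mod x 2 == 0)) (fun x => x) false
  let odd := PySem.List.sorted odd (fun x => x) false      -- odd.sort()
  let even := PySem.List.sorted even (fun x => x) false    -- even.sort()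
  let st := a.foldl
    (fun (st : List Int × Nat × Nat) num =>
      if PySem.Int.mod num 2 == 0 then
        (st.1 ++ [even.getD st.2.1 0], st.2.1 + 1, st.2.2)   -- even[even_idx] (in range inside Pre_)
      else
        (st.1 ++ [odd.getD st.2.2 0], st.2.1, st.2.2 + 1))   -- odd[odd_idx]
    ([], 0, 0)
  if st.1 = PySem.List.sorted a (fun x => x) false then "YES" else "NO"

-- ===== PORT B =====
def solve_alt (n : Int) (a : List Int) : String :=
  -- b = sorted(a[i] for i in range(n))
  let b := PySem.List.sorted ((PySem.List.pyRange 0 n 1).filterMap (fun i => PySem.List.pyGet? a i)) (fun x => x) false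
  -- all(a[i] % 2 == b[i] % 2 for i in range(len(a))): a[i], b[i] are in range wherever the Python
  -- returns a value (Python's all() short-circuits at the first False, before any out-of-range b[i])
  if (PySem.List.pyRange 0 (a.length : Int) 1).all
      (fun i => PySem.Int.mod (PySem.List.pyGetD a i 0) 2 == PySem.Int.mod (PySem.List.pyGetD b i 0) 2)
  then "YES" else "NO"

-- ===== PRECONDITION & SPEC =====
-- Pre_ is exactly where the Python A returns: n == len(a), or n < 0 with a empty
-- (then range(n) is empty and the loop body never runs); on every other input A raises IndexError.
def Pre_solve (n : Int) (a : List Int) : Prop := n = (a.length : Int) ∨ (n < 0 ∧ a = [])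
instance (n : Int) (a : List Int) : Decidable (Pre_solve n a) := by unfold Pre_solve; infer_instance

def pvWitness_solve : Int × List Int := (4, [3, 6, 2, 7])

def Spec_solve (n : Int) (a : List Int) (out : String) : Prop := out = solve_alt n a
instance (n : Int) (a : List Int) (out : String) : Decidable (Spec_solve n a out) := by unfold Spec_solve; infer_instance

-- ===== CLAIM (what is proved, stated in full; the proofs are below) =====
def Claim_equal_solve : Prop := ∀ (n : Int) (a : List Int), Dom_solve n a → Pre_solve n a → Spec_solve n a (solve n a)

-- ===== LEMMAS AND PROOFS =====

-- abbreviations used only by the proofs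
def par (x : Int) : Int := PySem.Int.mod x 2
def evb (x : Int) : Bool := PySem.Int.mod x 2 == 0

-- A's reconstruction, stated structurally: place the next even/odd supply element
-- according to the parity pattern of the first list.
def rebuild : List Int → List Int → List Int → List Int
  | [], _, _ => []
  | x :: xs, E, O =>
    if evb x then E.headD 0 :: rebuild xs (E.drop 1) O
    else O.headD 0 :: rebuild xs E (O.drop 1)

theorem par_mem : ∀ x : Int, par x = 0 ∨ par x = 1 := by
  intro x
  have h1 := PySem.Int.mod_nonneg x (b := 2) (by omega)
  have h2 := PySem.Int.mod_lt x (b := 2) (by omega)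
  unfold par; omega

theorem filterMap_pyGet?_eq_map (a : List Int) :
    ∀ r : List Int, (∀ i ∈ r, PySem.List.pyGet? a i = some (PySem.List.pyGetD a i 0)) →
      r.filterMap (fun i => PySem.List.pyGet? a i) = r.map (fun i => PySem.List.pyGetD a i 0) := by
  intro r
  induction r with
  | nil => intro _; rfl
  | cons y ys ih =>
      intro h
      simp only [List.filterMap_cons, List.map_cons, h y (by simp)]
      rw [ih (fun i hi => h i (by simp [hi]))]

theorem gathered_eq (a : List Int) :
    (PySem.List.pyRange 0 (a.length : Int) 1).filterMap (fun i => PySem.List.pyGet? a i) = a := by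
  rw [filterMap_pyGet?_eq_map a _ (fun i hi => by
    rw [PySem.List.mem_pyRange_one] at hi
    rw [PySem.List.pyGet?_eq_some_getElem a hi.1 hi.2,
      PySem.List.pyGetD_eq_getElem a 0 hi.1 hi.2])]
  exact PySem.List.map_pyGetD_pyRange_zero a 0

-- the fold in `solve`, characterised by `rebuild`
theorem loop_eq (E O : List Int) :
    ∀ (xs : List Int) (l : List Int) (e o : Nat),
      xs.foldl
        (fun (st : List Int × Nat × Nat) num =>
          if PySem.Int.mod num 2 == 0 then
            (st.1 ++ [E.getD st.2.1 0], st.2.1 + 1, st.2.2)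
          else
            (st.1 ++ [O.getD st.2.2 0], st.2.1, st.2.2 + 1))
        (l, e, o)
      = (l ++ rebuild xs (E.drop e) (O.drop o),
         e + (xs.countP evb), o + (xs.countP (fun x => !evb x))) := by
  intro xs
  induction xs with
  | nil => intro l e o; simp [rebuild]
  | cons x xs ih =>
      intro l e o
      simp only [List.foldl_cons]
      have hh : ∀ (L : List Int) (k : Nat), (L.drop k).headD 0 = L.getD k 0 := by
        intro L k
        simp [List.getD_eq_getElem?_getD, List.headD_eq_head?_getD, List.head?_drop]
      have hdd : ∀ (L : List Int) (k : Nat), (L.drop k).drop 1 = L.drop (k + 1) := by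
        intro L k; simp [List.drop_drop]
      by_cases hx : evb x
      · have hx' : (PySem.Int.mod x 2 == 0) = true := hx
        rw [if_pos hx', ih (l ++ [E.getD e 0]) (e + 1) o]
        have hreb : rebuild (x :: xs) (E.drop e) (O.drop o)
            = E.getD e 0 :: rebuild xs (E.drop (e + 1)) (O.drop o) := by
          simp only [rebuild]
          rw [if_pos hx, hh, hdd]
        rw [hreb]
        simp [hx, List.append_assoc]
        try omega
      · have hx' : ¬ ((PySem.Int.mod x 2 == 0) = true) := hx
        rw [if_neg hx', ih (l ++ [O.getD o 0]) e (o + 1)]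
        have hreb : rebuild (x :: xs) (E.drop e) (O.drop o)
            = O.getD o 0 :: rebuild xs (E.drop e) (O.drop (o + 1)) := by
          simp only [rebuild]
          rw [if_neg hx, hh, hdd]
        rw [hreb]
        simp [hx, List.append_assoc]
        try omega

-- forward: whatever the reconstruction produces has the parity pattern of its first argument
theorem rebuild_map_par :
    ∀ (xs E O : List Int), (∀ x ∈ E, evb x) → (∀ x ∈ O, ¬ evb x) →
      xs.countP evb ≤ E.length → xs.countP (fun x => !evb x) ≤ O.length →
      (rebuild xs E O).map par = xs.map par := by
  intro xs
  induction xs with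
  | nil => intro E O _ _ _ _; rfl
  | cons x xs ih =>
      intro E O hE hO hcE hcO
      by_cases hx : evb x
      · have hcons : 1 ≤ E.length := by
          have : xs.countP evb + 1 ≤ E.length := by
            simpa [List.countP_cons, hx] using hcE
          omega
        obtain ⟨e, E', rfl⟩ : ∃ e E', E = e :: E' := by
          cases E with
          | nil => simp at hcons
          | cons e E' => exact ⟨e, E', rfl⟩
        have hpe : par e = 0 := by
          have := hE e (by simp)
          simpa [evb, par] using this
        have hpx : par x = 0 := by simpa [evb, par] using hx
        simp only [rebuild, hx, if_pos, List.map_cons, List.headD_cons, List.drop_one,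
          List.tail_cons]
        rw [ih E' O (fun y hy => hE y (by simp [hy])) hO
          (by simpa [List.countP_cons, hx] using hcE)
          (by simpa [List.countP_cons, hx] using hcO)]
        rw [hpe, hpx]
      · have hcons : 1 ≤ O.length := by
          have : xs.countP (fun x => !evb x) + 1 ≤ O.length := by
            simpa [List.countP_cons, hx] using hcO
          omega
        obtain ⟨o, O', rfl⟩ : ∃ o O', O = o :: O' := by
          cases O with
          | nil => simp at hcons
          | cons o O' => exact ⟨o, O', rfl⟩
        have hpo : par o = 1 := by
          have h1 := hO o (by simp)
          rcases par_mem o with h | h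
          · exact absurd (by simpa [evb, par] using h) h1
          · exact h
        have hpx : par x = 1 := by
          rcases par_mem x with h | h
          · exact absurd (by simpa [evb, par] using h) hx
          · exact h
        simp only [rebuild, hx, if_neg, List.map_cons, List.headD_cons, List.drop_one,
          List.tail_cons, Bool.false_eq_true, not_false_iff]
        rw [ih E O' hE (fun y hy => hO y (by simp [hy]))
          (by simpa [List.countP_cons, hx] using hcE)
          (by simpa [List.countP_cons, hx] using hcO)]
        rw [hpo, hpx]

-- backward: if the parity patterns agree, rebuilding from s's own evens and odds returns s
theorem rebuild_of_map_par :
    ∀ (xs s : List Int), xs.map par = s.map par →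
      rebuild xs (s.filter evb) (s.filter (fun x => !evb x)) = s := by
  intro xs
  induction xs with
  | nil =>
      intro s h
      cases s with
      | nil => rfl
      | cons y ys => simp at h
  | cons x xs ih =>
      intro s h
      cases s with
      | nil => simp at h
      | cons y ys =>
          simp only [List.map_cons, List.cons.injEq] at h
          obtain ⟨hp, hrest⟩ := h
          by_cases hx : evb x
          · have hy : evb y := by
              have : par y = 0 := by rw [← hp]; simpa [evb, par] using hx
              simpa [evb, par] using this
            simp only [rebuild, hx, if_pos, List.filter_cons, hy, Bool.not_true,
              Bool.false_eq_true, List.headD_cons, List.drop_one, List.tail_cons,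
              reduceIte]
            rw [ih ys hrest]
          · have hy : ¬ evb y := by
              intro hy
              have h0 : par y = 0 := by simpa [evb, par] using hy
              have : evb x := by simpa [evb, par] using hp.trans h0
              exact hx this
            simp only [rebuild, hx, List.filter_cons, hy, Bool.not_false,
              List.headD_cons, List.drop_one, List.tail_cons, Bool.false_eq_true,
              reduceIte]
            rw [ih ys hrest]

-- sorting commutes with filtering
theorem sorted_filter_comm (a : List Int) (q : Int → Bool) :
    PySem.List.sorted (a.filter q) (fun x => x) false
      = (PySem.List.sorted a (fun x => x) false).filter q := by
  apply PySem.List.eq_of_perm_of_pairwise_le_of_injective (key := fun x : Int => x)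
    (fun _ _ h => h)
  · exact (PySem.List.sorted_perm _ _ _).trans
      ((PySem.List.sorted_perm a _ _).filter q).symm
  · exact PySem.List.sorted_pairwise _ _
  · exact (PySem.List.sorted_pairwise a _).filter _

theorem all_par_iff (u v : List Int) (hlen : u.length = v.length) :
    ((PySem.List.pyRange 0 (u.length : Int) 1).all
        (fun i => PySem.Int.mod (PySem.List.pyGetD u i 0) 2 == PySem.Int.mod (PySem.List.pyGetD v i 0) 2) = true)
      ↔ u.map par = v.map par := by
  rw [List.all_eq_true]
  constructor
  · intro h
    apply List.ext_getElem (by simp [hlen])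
    intro i h1 h2
    simp only [List.length_map] at h1 h2
    have hm := h (i : Int) (PySem.List.mem_pyRange_one.mpr ⟨by positivity, by exact_mod_cast h1⟩)
    rw [PySem.List.pyGetD_eq_getElem u 0 (by positivity) (by exact_mod_cast h1),
      PySem.List.pyGetD_eq_getElem v 0 (by positivity) (by exact_mod_cast h2)] at hm
    simp only [Int.toNat_natCast] at hm
    simpa [par, List.getElem_map] using of_decide_eq_true hm
  · intro hmap i hi
    rw [PySem.List.mem_pyRange_one] at hi
    have h1 : i.toNat < u.length := by omega
    have h2 : i.toNat < v.length := by omega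
    rw [PySem.List.pyGetD_eq_getElem u 0 hi.1 hi.2,
      PySem.List.pyGetD_eq_getElem v 0 hi.1 (by omega)]
    have := congrArg (fun L => L[i.toNat]?) hmap
    simp only [List.getElem?_map, List.getElem?_eq_getElem h1, List.getElem?_eq_getElem h2,
      Option.map_some] at this
    simp only [par] at this
    simpa using this

theorem solve_eq_alt (n : Int) (a : List Int) (hpre : Pre_solve n a) :
    solve n a = solve_alt n a := by
  rcases hpre with hn | ⟨hn, rfl⟩
  · subst hn
    set s := PySem.List.sorted a (fun x => x) false with hs
    have hg := gathered_eq a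
    have hE : PySem.List.sorted (a.filter (fun x => PySem.Int.mod x 2 == 0)) (fun x => x) false
        = s.filter evb := by
      rw [sorted_filter_comm]; rfl
    have hO : PySem.List.sorted (a.filter (fun x => !(PySem.Int.mod x 2 == 0))) (fun x => x) false
        = s.filter (fun x => !evb x) := by
      rw [sorted_filter_comm]; rfl
    have hperm : s.Perm a := PySem.List.sorted_perm a _ _
    have hE2 : PySem.List.sorted (s.filter evb) (fun x => x) false = s.filter evb :=
      PySem.List.sorted_eq_self_of_pairwise _ _ ((PySem.List.sorted_pairwise a _).filter _)
    have hO2 : PySem.List.sorted (s.filter (fun x => !evb x)) (fun x => x) false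
        = s.filter (fun x => !evb x) :=
      PySem.List.sorted_eq_self_of_pairwise _ _ ((PySem.List.sorted_pairwise a _).filter _)
    unfold solve solve_alt
    simp only [hg, hE, hO, hE2, hO2]
    rw [loop_eq]
    simp only [List.drop_zero, List.nil_append]
    -- both sides are ite on equivalent conditions
    have key : (rebuild a (s.filter evb) (s.filter (fun x => !evb x)) = s)
        ↔ (a.map par = s.map par) := by
      constructor
      · intro h
        have h1 : (rebuild a (s.filter evb) (s.filter (fun x => !evb x))).map par = a.map par := by
          apply rebuild_map_par
          · intro x hx; exact (List.mem_filter.mp hx).2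
          · intro x hx
            have := (List.mem_filter.mp hx).2
            simp only [Bool.not_eq_true'] at this
            simp [this]
          · rw [← List.countP_eq_length_filter, hperm.countP_eq]
          · rw [← List.countP_eq_length_filter, hperm.countP_eq]
        rw [h] at h1
        exact h1.symm
      · intro h
        exact rebuild_of_map_par a s h
    have key2 := all_par_iff a s hperm.length_eq.symm
    by_cases hc : rebuild a (s.filter evb) (s.filter (fun x => !evb x)) = s
    · rw [if_pos hc, if_pos (key2.mpr (key.mp hc))]
    · rw [if_neg hc, if_neg (fun hcond => hc (key.mpr (key2.mp hcond)))]
  · -- n < 0, a = []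
    have hr : PySem.List.pyRange 0 n 1 = [] := PySem.List.pyRange_one_eq_nil (by omega)
    unfold solve solve_alt
    simp [hr, PySem.List.sorted]

-- ===== VERDICT (by name: the statement is the Claim_ definition above) =====
theorem solve_spec : Claim_equal_solve := by
  intro n a _ hpre
  unfold Spec_solve
  exact solve_eq_alt n a hpre
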